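-- pv_equiv track=rewrite | github.com/susmitpy/to_roman_numeral | app.py | parse
-- ===== SOURCE A (Python) =====
-- def parse(s):
--     last_char = None
--     last_count = 0
--     temp = []
--     final = []
--     for c in s:
--         temp.append(c)
--         if last_char is None:
--             last_char = c
--             last_count = 1
--             continue
--
--         if last_char == c:
--             last_count += 1
--             if last_count == 4:
--                 if last_char == "I":
--                     final.append("IV")
--                     temp.clear()
--                 elif last_char == "X":
--                     final.append("XL")
--                     temp.clear()
--                 elif last_char == "C":
--                     final.append("CD")
--                     temp.clear()
--         else:
--             last_char = c
--             last_count = 1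
--
--             final.extend(temp[:-1])
--             temp = temp[-1:]
--     final.extend(temp)
--     return "".join(final)
-- ===== SOURCE B (Python) =====
-- def parse(s):
--     sub = {"I": "IV", "X": "XL", "C": "CD"}
--     pieces = []
--     i = 0
--     n = len(s)
--     while i < n:
--         c = s[i]
--         j = i
--         while j < n and s[j] == c:
--             j += 1
--         k = j - i
--         if c in sub and k >= 4:
--             pieces.append(sub[c] + c * (k - 4))
--         else:
--             pieces.append(c * k)
--         i = j
--     return "".join(pieces)
-- ===== Notes on version B (the rewrite author's own statement) =====
-- stated objective: simpler
-- what changed: Replaced A's single-pass temp/flush/last_count state machine by a run-length decomposition: scan each maximal run of identical characters, map the run directly to its piece (subtractive pair IV/XL/CD plus the count-4 tail for I/X/C runs of length >= 4, plain repetition otherwise) and join the pieces.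
import Mathlib
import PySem

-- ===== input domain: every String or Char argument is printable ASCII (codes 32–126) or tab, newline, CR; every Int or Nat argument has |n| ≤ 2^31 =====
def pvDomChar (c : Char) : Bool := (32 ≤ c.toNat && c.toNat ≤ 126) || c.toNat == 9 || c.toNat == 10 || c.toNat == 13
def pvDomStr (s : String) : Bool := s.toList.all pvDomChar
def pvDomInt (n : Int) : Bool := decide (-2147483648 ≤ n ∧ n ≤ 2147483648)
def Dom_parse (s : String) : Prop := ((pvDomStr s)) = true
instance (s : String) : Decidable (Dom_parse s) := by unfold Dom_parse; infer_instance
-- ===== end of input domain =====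

-- B replaces A's single-pass temp/flush/last_count bookkeeping by a run-length decomposition
-- (find each maximal run, map it to its piece, join); objective: simpler. Same cost, no speed claim.

-- ===== PORT A =====
-- state: (last_char, last_count, temp, final), exactly A's four variables
def pvStepA : (Option Char × Int × List Char × List String) → Char → (Option Char × Int × List Char × List String)
  | (lastChar, lastCount, temp0, final), c =>
    let temp := temp0 ++ [c]                          -- temp.append(c)
    match lastChar with
    | none => (some c, 1, temp, final)
    | some lc =>
      if lc = c then
        let lastCount := lastCount + 1
        if lastCount = 4 then
          if lc = 'I' then (some lc, lastCount, [], final ++ ["IV"])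
          else if lc = 'X' then (some lc, lastCount, [], final ++ ["XL"])
          else if lc = 'C' then (some lc, lastCount, [], final ++ ["CD"])
          else (some lc, lastCount, temp, final)
        else (some lc, lastCount, temp, final)
      else
        (some c, 1, PySem.List.slice temp (some (-1)) none,          -- temp = temp[-1:]
         final ++ (PySem.List.slice temp none (some (-1))).map (fun ch => String.ofList [ch]))  -- final.extend(temp[:-1])

def parse (s : String) : String :=
  let st := s.toList.foldl pvStepA (none, 0, [], [])
  PySem.Str.join "" (st.2.2.2 ++ st.2.2.1.map (fun ch => String.ofList [ch]))  -- final.extend(temp); "".join(final)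

-- ===== PORT B =====
def pvSubPair (c : Char) : List Char :=
  if c = 'I' then ['I', 'V'] else if c = 'X' then ['X', 'L'] else ['C', 'D']

def pvIsIXC (c : Char) : Bool := c = 'I' || c = 'X' || c = 'C'

-- piece emitted for a maximal run of k copies of c
def pvPiece (c : Char) (k : Nat) : List Char :=
  if pvIsIXC c ∧ 4 ≤ k then pvSubPair c ++ List.replicate (k - 4) c else List.replicate k c

-- the run-length scan of B's outer while loop: one piece per maximal run
def pvRuns : List Char → List (List Char)
  | [] => []
  | c :: rest =>
    pvPiece c ((rest.takeWhile (· == c)).length + 1) :: pvRuns (rest.dropWhile (· == c))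
termination_by l => l.length
decreasing_by
  simp only [List.length_cons]
  exact Nat.lt_succ_of_le (List.length_dropWhile_le _ _)

def parse_alt (s : String) : String := String.ofList (pvRuns s.toList).flatten

-- ===== PRECONDITION & SPEC =====
def Spec_parse (s : String) (out : String) : Prop := out = parse_alt s
instance (s : String) (out : String) : Decidable (Spec_parse s out) := by unfold Spec_parse; infer_instance

-- ===== CLAIM (what is proved, stated in full; the proofs are below) =====
def Claim_equal_parse : Prop := ∀ (s : String), Dom_parse s → Spec_parse s (parse s)

-- ===== LEMMAS AND PROOFS =====

-- A's temp list while inside a run of m copies of lc (cleared at the flush)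
def pvTempOf (lc : Char) (m : Nat) : List Char :=
  if pvIsIXC lc ∧ 4 ≤ m then List.replicate (m - 4) lc else List.replicate m lc

-- the subtractive pair A has already flushed into final for the current run
def pvFlushPre (lc : Char) (m : Nat) : List Char :=
  if pvIsIXC lc ∧ 4 ≤ m then pvSubPair lc else []

-- strings A appends to final at the step that reaches count m
def pvFlushStrs (lc : Char) (m : Nat) : List String :=
  if pvIsIXC lc ∧ m = 4 then [String.ofList (pvSubPair lc)] else []

-- characters A will still output, given current run (lc, m) and remaining input
def pvCont (lc : Char) (m : Nat) : List Char → List Char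
  | [] => pvTempOf lc m
  | c :: rest =>
    if c = lc then (if pvIsIXC lc ∧ m + 1 = 4 then pvSubPair lc else []) ++ pvCont lc (m + 1) rest
    else pvTempOf lc m ++ pvCont c 1 rest

def pvJoinS (l : List String) : List Char := (l.map String.toList).flatten

lemma pvInterNil (l : List (List Char)) : List.intercalate ([] : List Char) l = l.flatten := by
  induction l with
  | nil => rfl
  | cons a t ih => cases t <;> simp_all [List.intercalate, List.intersperse]

lemma pvJoinS_append (a b : List String) : pvJoinS (a ++ b) = pvJoinS a ++ pvJoinS b := by
  simp [pvJoinS]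

lemma pvJoinS_singles (l : List Char) :
    pvJoinS (l.map (fun ch => String.ofList [ch])) = l := by
  induction l with
  | nil => rfl
  | cons c t ih => simpa [pvJoinS] using congrArg (c :: ·) ih

lemma pvTempOf_succ (lc : Char) (m : Nat) (h : ¬(pvIsIXC lc = true ∧ m + 1 = 4)) :
    pvTempOf lc m ++ [lc] = pvTempOf lc (m + 1) := by
  unfold pvTempOf
  by_cases hx : pvIsIXC lc = true
  · by_cases h4 : 4 ≤ m
    · have h4' : 4 ≤ m + 1 := by omega
      have : m - 4 + 1 = m + 1 - 4 := by omega
      simp [hx, h4, h4', ← List.replicate_succ', this]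
    · have hm4 : ¬ (m + 1 = 4) := fun he => h ⟨hx, he⟩
      have h4' : ¬ 4 ≤ m + 1 := by omega
      simp [hx, h4, h4', ← List.replicate_succ']
  · simp [hx, ← List.replicate_succ']

lemma pvStepA_same (lc : Char) (m : Nat) (final : List String) :
    pvStepA (some lc, (m : Int), pvTempOf lc m, final) lc
      = (some lc, ((m + 1 : Nat) : Int), pvTempOf lc (m + 1), final ++ pvFlushStrs lc (m + 1)) := by
  by_cases hx : pvIsIXC lc = true
  · by_cases hm3 : m = 3
    · subst hm3
      have hx' := hx
      simp only [pvIsIXC, Bool.or_eq_true, decide_eq_true_eq] at hx'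
      rcases hx' with (h | h) | h <;> subst h <;>
        simp [pvStepA, pvTempOf, pvFlushStrs, pvIsIXC, pvSubPair]
    · have hc4 : ¬ ((m : Int) + 1 = 4) := by omega
      have hfl : pvFlushStrs lc (m + 1) = [] := by
        unfold pvFlushStrs; rw [if_neg (by rintro ⟨-, h⟩; omega)]
      have htemp := pvTempOf_succ lc m (by rintro ⟨-, h⟩; omega)
      simp [pvStepA, hc4, hfl, ← htemp]
  · have hI : ¬ lc = 'I' := by rintro rfl; simp [pvIsIXC] at hx
    have hX : ¬ lc = 'X' := by rintro rfl; simp [pvIsIXC] at hx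
    have hC : ¬ lc = 'C' := by rintro rfl; simp [pvIsIXC] at hx
    have hfl : pvFlushStrs lc (m + 1) = [] := by
      unfold pvFlushStrs; rw [if_neg (by rintro ⟨h, -⟩; exact hx h)]
    have htemp := pvTempOf_succ lc m (by rintro ⟨h, -⟩; exact hx h)
    by_cases hc4 : (m : Int) + 1 = 4
    · simp [pvStepA, hc4, hI, hX, hC, hfl, ← htemp]
    · simp [pvStepA, hc4, hfl, ← htemp]

lemma pvStepA_diff (lc c : Char) (m : Nat) (final : List String) (hc : ¬ lc = c) :
    pvStepA (some lc, (m : Int), pvTempOf lc m, final) c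
      = (some c, ((1 : Nat) : Int), pvTempOf c 1,
         final ++ (pvTempOf lc m).map (fun ch => String.ofList [ch])) := by
  have h1 : PySem.List.slice (pvTempOf lc m ++ [c]) (some (-1)) none = [c] := by
    rw [PySem.List.slice_from_neg_one]; simp
  have h2 : PySem.List.slice (pvTempOf lc m ++ [c]) none (some (-1)) = pvTempOf lc m := by
    simp [PySem.List.slice_to_neg_one]
  have h3 : pvTempOf c 1 = [c] := by
    simp [pvTempOf]
  simp [pvStepA, hc, h1, h2, h3]

-- A's loop from an in-run state outputs exactly pvCont
lemma pvLoopA (rest : List Char) : ∀ (lc : Char) (m : Nat) (final : List String),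
    pvJoinS (rest.foldl pvStepA (some lc, (m : Int), pvTempOf lc m, final)).2.2.2
      ++ (rest.foldl pvStepA (some lc, (m : Int), pvTempOf lc m, final)).2.2.1
    = pvJoinS final ++ pvCont lc m rest := by
  induction rest with
  | nil => intro lc m final; simp [pvCont]
  | cons c rest ih =>
    intro lc m final
    rw [List.foldl_cons]
    by_cases hc : lc = c
    · subst hc
      rw [pvStepA_same, ih, pvJoinS_append]
      have : pvJoinS (pvFlushStrs lc (m + 1)) = (if pvIsIXC lc = true ∧ m = 3 then pvSubPair lc else []) := by
        unfold pvFlushStrs pvJoinS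
        by_cases h : pvIsIXC lc = true ∧ m = 3
        · obtain ⟨hx, hm⟩ := h; subst hm; simp [hx]
        · rw [if_neg (by rintro ⟨hx, h4⟩; exact h ⟨hx, by omega⟩), if_neg h]; rfl
      simp [pvCont, this, List.append_assoc]
    · rw [pvStepA_diff lc c m final hc, ih, pvJoinS_append, pvJoinS_singles]
      have hc' : ¬ c = lc := fun h => hc h.symm
      simp [pvCont, hc', List.append_assoc]

lemma pvTakeWhile_rep (k : Nat) (lc c : Char) (rest : List Char) (h : ¬ c = lc) :
    (List.replicate k lc ++ c :: rest).takeWhile (· == lc) = List.replicate k lc := by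
  induction k with
  | zero => simp [h]
  | succ n ih => simp_all [List.replicate_succ, List.takeWhile]

lemma pvDropWhile_rep (k : Nat) (lc c : Char) (rest : List Char) (h : ¬ c = lc) :
    (List.replicate k lc ++ c :: rest).dropWhile (· == lc) = c :: rest := by
  induction k with
  | zero => simp [h]
  | succ n ih => simp_all [List.replicate_succ, List.dropWhile]

lemma pvRuns_rep (m : Nat) (lc : Char) (hm : 1 ≤ m) :
    pvRuns (List.replicate m lc) = [pvPiece lc m] := by
  obtain ⟨n, rfl⟩ : ∃ n, m = n + 1 := ⟨m - 1, by omega⟩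
  rw [List.replicate_succ, pvRuns]
  simp [pvRuns]

lemma pvRuns_rep_cons (m : Nat) (lc c : Char) (rest : List Char) (hm : 1 ≤ m) (h : ¬ c = lc) :
    pvRuns (List.replicate m lc ++ c :: rest) = pvPiece lc m :: pvRuns (c :: rest) := by
  obtain ⟨n, rfl⟩ : ∃ n, m = n + 1 := ⟨m - 1, by omega⟩
  rw [List.replicate_succ, List.cons_append, pvRuns,
      pvTakeWhile_rep n lc c rest h, pvDropWhile_rep n lc c rest h]
  simp

lemma pvPiece_eq (lc : Char) (m : Nat) : pvPiece lc m = pvFlushPre lc m ++ pvTempOf lc m := by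
  unfold pvPiece pvFlushPre pvTempOf
  by_cases h : pvIsIXC lc = true ∧ 4 ≤ m <;> simp [h]

lemma pvFlushPre_succ (lc : Char) (m : Nat) :
    pvFlushPre lc m ++ (if pvIsIXC lc = true ∧ m = 3 then pvSubPair lc else []) = pvFlushPre lc (m + 1) := by
  unfold pvFlushPre
  by_cases hx : pvIsIXC lc = true
  · by_cases hm : m = 3
    · subst hm
      rw [if_neg (show ¬(pvIsIXC lc = true ∧ 4 ≤ 3) by rintro ⟨-, h⟩; omega),
          if_pos (show pvIsIXC lc = true ∧ (3 : Nat) = 3 from ⟨hx, rfl⟩),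
          if_pos (show pvIsIXC lc = true ∧ 4 ≤ 3 + 1 from ⟨hx, by omega⟩), List.nil_append]
    · rw [if_neg (show ¬(pvIsIXC lc = true ∧ m = 3) by rintro ⟨-, h⟩; exact hm h), List.append_nil]
      by_cases h4 : 4 ≤ m
      · rw [if_pos (show pvIsIXC lc = true ∧ 4 ≤ m from ⟨hx, h4⟩),
            if_pos (show pvIsIXC lc = true ∧ 4 ≤ m + 1 from ⟨hx, by omega⟩)]
      · rw [if_neg (show ¬(pvIsIXC lc = true ∧ 4 ≤ m) by rintro ⟨-, h⟩; exact h4 h),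
            if_neg (show ¬(pvIsIXC lc = true ∧ 4 ≤ m + 1) by rintro ⟨-, h⟩; omega)]
  · rw [if_neg (show ¬(pvIsIXC lc = true ∧ 4 ≤ m) by rintro ⟨h, -⟩; exact hx h),
        if_neg (show ¬(pvIsIXC lc = true ∧ m = 3) by rintro ⟨h, -⟩; exact hx h),
        if_neg (show ¬(pvIsIXC lc = true ∧ 4 ≤ m + 1) by rintro ⟨h, -⟩; exact hx h)]
    rfl

-- pvCont matches B's run pieces
lemma pvContB (rest : List Char) : ∀ (lc : Char) (m : Nat), 1 ≤ m →
    pvFlushPre lc m ++ pvCont lc m rest = (pvRuns (List.replicate m lc ++ rest)).flatten := by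
  induction rest with
  | nil =>
    intro lc m hm
    rw [List.append_nil, pvRuns_rep m lc hm]
    simp [pvCont, pvPiece_eq]
  | cons c rest ih =>
    intro lc m hm
    by_cases hc : c = lc
    · subst hc
      have : List.replicate m c ++ c :: rest = List.replicate (m + 1) c ++ rest := by
        rw [List.replicate_succ' ]; simp
      rw [this, ← ih c (m + 1) (by omega)]
      have hcont : pvCont c m (c :: rest) = (if pvIsIXC c = true ∧ m = 3 then pvSubPair c else []) ++ pvCont c (m + 1) rest := by
        simp [pvCont]
      rw [hcont, ← List.append_assoc, pvFlushPre_succ]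
    · rw [pvRuns_rep_cons m lc c rest hm hc]
      have h1 : pvCont c 1 rest = (pvRuns (c :: rest)).flatten := by
        have := ih c 1 (by omega)
        simpa [pvFlushPre, pvIsIXC] using this
      simp [pvCont, hc, pvPiece_eq, h1, List.append_assoc]

lemma pvParse_toList (s : String) : (parse s).toList = (parse_alt s).toList := by
  unfold parse parse_alt
  cases hs : s.toList with
  | nil => simp [pvRuns, pysem]
  | cons c rest =>
    have hfirst : pvStepA (none, 0, [], []) c = (some c, ((1 : Nat) : Int), pvTempOf c 1, []) := by
      have h3 : pvTempOf c 1 = [c] := by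
        simp [pvTempOf]
      simp [pvStepA, h3]
    have hjoin : ∀ (L : List String), (PySem.Str.join "" L).toList = pvJoinS L := by
      intro L
      simp [pysem, pvJoinS, PySem.Chars.join, pvInterNil]
    rw [List.foldl_cons, hfirst]
    have hA := pvLoopA rest c 1 []
    have hB := pvContB rest c 1 (by omega)
    simp only [pvFlushPre, pvIsIXC] at hB
    have hB' : pvCont c 1 rest = (pvRuns (c :: rest)).flatten := by
      simpa using hB
    calc (PySem.Str.join "" ((List.foldl pvStepA (some c, ((1 : Nat) : Int), pvTempOf c 1, []) rest).2.2.2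
            ++ (List.foldl pvStepA (some c, ((1 : Nat) : Int), pvTempOf c 1, []) rest).2.2.1.map
                 (fun ch => String.ofList [ch]))).toList
        = pvJoinS ((List.foldl pvStepA (some c, ((1 : Nat) : Int), pvTempOf c 1, []) rest).2.2.2)
            ++ (List.foldl pvStepA (some c, ((1 : Nat) : Int), pvTempOf c 1, []) rest).2.2.1 := by
          rw [hjoin, pvJoinS_append, pvJoinS_singles]
      _ = pvJoinS [] ++ pvCont c 1 rest := hA
      _ = (String.ofList (pvRuns (c :: rest)).flatten).toList := by
          rw [hB']; simp [pvJoinS]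

-- ===== VERDICT (by name: the statement is the Claim_ definition above) =====
theorem parse_spec : Claim_equal_parse := by
  intro s _
  unfold Spec_parse
  exact String.ext (pvParse_toList s)
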